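-- pv_equiv track=rewrite | github.com/Makwanajeeya/Bit-Stuffing-and-CRC-Simulator | Bit_Stuffing_CRC_Simulator.py | bit_unstuff
-- ===== SOURCE A (Python) =====
-- def bit_unstuff(data, max_ones=5):
--     unstuffed = ""
--     count = 0
--     i = 0
--     while i < len(data):
--         unstuffed += data[i]
--         if data[i] == '1':
--             count += 1
--             if count == max_ones and i + 1 < len(data) and data[i + 1] == '0':
--                 i += 1
--                 count = 0
--         else:
--             count = 0
--         i += 1
--     return unstuffed
-- ===== SOURCE B (Python) =====
-- from itertools import groupby
--
-- def bit_unstuff(data, max_ones=5):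
--     runs = [(c, len(list(g))) for c, g in groupby(data)]
--     pieces = []
--     pending = False
--     for c, n in runs:
--         m = n - 1 if (pending and c == '0') else n
--         pieces.append(c * m)
--         pending = (c == '1' and n == max_ones)
--     return "".join(pieces)
-- ===== Notes on version B (the rewrite author's own statement) =====
-- stated objective: faster
-- what changed: Replaced the per-character counter-and-skip index loop with quadratic string += by an itertools.groupby run-length traversal: each (char, run length) run is emitted as one piece and joined once, with one zero dropped from the run following an exactly-max_ones run of ones.
import Mathlib
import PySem

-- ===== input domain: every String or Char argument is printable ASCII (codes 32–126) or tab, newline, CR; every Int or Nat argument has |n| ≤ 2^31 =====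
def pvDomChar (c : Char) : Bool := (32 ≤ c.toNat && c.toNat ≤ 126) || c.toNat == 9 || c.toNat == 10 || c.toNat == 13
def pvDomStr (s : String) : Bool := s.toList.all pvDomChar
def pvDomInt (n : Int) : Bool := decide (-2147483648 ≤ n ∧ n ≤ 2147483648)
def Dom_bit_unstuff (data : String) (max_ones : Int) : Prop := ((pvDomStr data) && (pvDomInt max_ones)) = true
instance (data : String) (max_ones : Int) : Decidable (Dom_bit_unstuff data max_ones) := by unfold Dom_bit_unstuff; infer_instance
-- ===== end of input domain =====

-- B replaces A's per-character counter-and-skip scan (quadratic string +=) by a run-length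
-- (groupby) traversal dropping one zero after each exact-max_ones run of ones; objective: faster (measured).

-- ===== PORT A =====
-- A's while loop: index i becomes the remaining suffix, `count` and the accumulator string
-- are carried as parameters; the skip (i += 1 inside the branch) consumes rest.tail.
def bitUnstuffLoop (m : Int) (l : List Char) (count : Int) (acc : List Char) : List Char :=
  match l with
  | [] => acc
  | c :: rest =>
    if c = '1' then
      if count + 1 = m ∧ rest.head? = some '0' then
        bitUnstuffLoop m rest.tail 0 (acc ++ [c])
      else bitUnstuffLoop m rest (count + 1) (acc ++ [c])
    else bitUnstuffLoop m rest 0 (acc ++ [c])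
termination_by l.length
decreasing_by all_goals simp [List.length_tail]; try omega

def bit_unstuff (data : String) (max_ones : Int) : String :=
  String.mk (bitUnstuffLoop max_ones data.toList 0 [])

-- ===== PORT B =====
-- itertools.groupby materialised as (char, run length) pairs
def pyRunsAux (c : Char) (n : Nat) : List Char → List (Char × Nat)
  | [] => [(c, n)]
  | d :: rest => if d = c then pyRunsAux c (n + 1) rest else (c, n) :: pyRunsAux d 1 rest

def pyRuns : List Char → List (Char × Nat)
  | [] => []
  | c :: rest => pyRunsAux c 1 rest

-- the for-loop over runs: pieces list with the `pending` flag
def emitPieces (m : Int) : List (Char × Nat) → Bool → List (List Char)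
  | [], _ => []
  | (c, n) :: rest, pending =>
    List.replicate (if pending && (c == '0') then n - 1 else n) c
      :: emitPieces m rest ((c == '1') && ((n : Int) == m))

def bit_unstuff_alt (data : String) (max_ones : Int) : String :=
  String.mk ((emitPieces max_ones (pyRuns data.toList) false).flatten)

-- ===== PRECONDITION & SPEC =====
def Spec_bit_unstuff (data : String) (max_ones : Int) (out : String) : Prop := out = bit_unstuff_alt data max_ones
instance (data : String) (max_ones : Int) (out : String) : Decidable (Spec_bit_unstuff data max_ones out) := by unfold Spec_bit_unstuff; infer_instance

-- ===== CLAIM (what is proved, stated in full; the proofs are below) =====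
def Claim_equal_bit_unstuff : Prop := ∀ (data : String) (max_ones : Int), Dom_bit_unstuff data max_ones → Spec_bit_unstuff data max_ones (bit_unstuff data max_ones)

-- ===== LEMMAS AND PROOFS =====

-- count is irrelevant when the next char is not '1'
theorem loop_reset (m : Int) (l : List Char) (count : Int) (acc : List Char)
    (h : l.head? ≠ some '1') :
    bitUnstuffLoop m l count acc = bitUnstuffLoop m l 0 acc := by
  cases l with
  | nil => simp [bitUnstuffLoop]
  | cons d rest =>
    have hd : d ≠ '1' := by simpa using h
    simp [bitUnstuffLoop, hd]

-- a run of a non-'1' character just gets copied, count ends at 0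
theorem loop_run0 (m : Int) (c : Char) (hc : c ≠ '1') :
    ∀ (j : Nat) (rest : List Char) (count : Int) (acc : List Char),
    bitUnstuffLoop m (List.replicate (j + 1) c ++ rest) count acc
      = bitUnstuffLoop m rest 0 (acc ++ List.replicate (j + 1) c) := by
  intro j
  induction j with
  | zero => intro rest count acc; simp [bitUnstuffLoop, hc]
  | succ j ih =>
    intro rest count acc
    rw [List.replicate_succ]
    simp only [List.cons_append, bitUnstuffLoop, if_neg hc]
    rw [ih rest 0 (acc ++ [c])]
    simp [List.replicate_succ]

-- a maximal run of ones: skip one following zero iff its length makes count hit m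
theorem loop_run1 (m : Int) :
    ∀ (j : Nat) (rest : List Char) (count : Int) (acc : List Char),
    rest.head? ≠ some '1' →
    bitUnstuffLoop m (List.replicate (j + 1) '1' ++ rest) count acc
      = if count + ((j : Int) + 1) = m ∧ rest.head? = some '0' then
          bitUnstuffLoop m rest.tail 0 (acc ++ List.replicate (j + 1) '1')
        else
          bitUnstuffLoop m rest 0 (acc ++ List.replicate (j + 1) '1') := by
  intro j
  induction j with
  | zero =>
    intro rest count acc h
    simp only [Nat.cast_zero, zero_add]
    have e1 : (List.replicate (0 + 1) '1' ++ rest) = '1' :: rest := by simp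
    rw [e1]
    have e2 : (List.replicate (0 + 1) '1' : List Char) = ['1'] := by simp
    rw [e2]
    by_cases hc : count + 1 = m ∧ rest.head? = some '0'
    · simp only [bitUnstuffLoop, if_pos rfl, if_true, if_pos hc]
    · simp only [bitUnstuffLoop, if_pos rfl, if_true, if_neg hc]
      exact loop_reset m rest (count + 1) (acc ++ ['1']) h
  | succ j ih =>
    intro rest count acc h
    have e1 : (List.replicate (j + 1 + 1) '1' ++ rest) = '1' :: (List.replicate (j + 1) '1' ++ rest) := by
      rw [List.replicate_succ, List.cons_append]
    rw [e1]
    have hh : (List.replicate (j + 1) '1' ++ rest).head? = some '1' := by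
      rw [List.replicate_succ, List.cons_append]; rfl
    have hstep : bitUnstuffLoop m ('1' :: (List.replicate (j + 1) '1' ++ rest)) count acc
        = bitUnstuffLoop m (List.replicate (j + 1) '1' ++ rest) (count + 1) (acc ++ ['1']) := by
      have hfalse : ¬ (count + 1 = m ∧ (List.replicate (j + 1) '1' ++ rest).head? = some '0') := by
        rw [hh]; simp
      simp only [bitUnstuffLoop, if_pos rfl, if_true, if_neg hfalse]
    rw [hstep, ih rest (count + 1) (acc ++ ['1']) h]
    have ecast : (count + 1) + ((j : Int) + 1) = count + (((j : Nat) + 1 : Nat) + 1 : Int) := by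
      push_cast; ring
    have eacc : acc ++ ['1'] ++ List.replicate (j + 1) '1' = acc ++ List.replicate (j + 1 + 1) '1' := by
      simp [List.replicate_succ]
    rw [ecast, eacc]

theorem runsAux_replicate (c : Char) :
    ∀ (j n : Nat) (rest : List Char),
    pyRunsAux c n (List.replicate j c ++ rest) = pyRunsAux c (n + j) rest := by
  intro j
  induction j with
  | zero => intro n rest; simp
  | succ j ih =>
    intro n rest
    rw [List.replicate_succ]
    have h1 : pyRunsAux c n (c :: (List.replicate j c ++ rest))
        = pyRunsAux c (n + 1) (List.replicate j c ++ rest) := by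
      simp [pyRunsAux]
    rw [List.cons_append, h1, ih (n + 1) rest]
    have e : n + 1 + j = n + (j + 1) := by omega
    rw [e]

theorem runsAux_stop (c : Char) (n : Nat) (rest : List Char) (h : rest.head? ≠ some c) :
    pyRunsAux c n rest = (c, n) :: pyRuns rest := by
  cases rest with
  | nil => rfl
  | cons d r =>
    have hd : d ≠ c := by simpa using h
    simp [pyRunsAux, pyRuns, hd]

theorem runs_run (c : Char) (j : Nat) (rest : List Char) (h : rest.head? ≠ some c) :
    pyRuns (List.replicate (j + 1) c ++ rest) = (c, j + 1) :: pyRuns rest := by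
  rw [List.replicate_succ]
  simp only [List.cons_append, pyRuns]
  rw [runsAux_replicate c j 1 rest, runsAux_stop c (1 + j) rest h]
  congr 2
  omega

theorem runsAux_first (c : Char) : ∀ (l : List Char) (n : Nat),
    ∃ k rs, pyRunsAux c n l = (c, k) :: rs := by
  intro l
  induction l with
  | nil => intro n; exact ⟨n, [], rfl⟩
  | cons d r ih =>
    intro n
    by_cases hd : d = c
    · subst hd; simpa [pyRunsAux] using ih (n + 1)
    · exact ⟨n, pyRunsAux d 1 r, by simp [pyRunsAux, hd]⟩

-- pending only matters when the first run is a zero run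
theorem emit_pending_irrel (m : Int) (rs : List (Char × Nat))
    (h : ∀ n rs', rs ≠ ('0', n) :: rs') :
    emitPieces m rs true = emitPieces m rs false := by
  cases rs with
  | nil => rfl
  | cons p rest =>
    obtain ⟨c, n⟩ := p
    have hc : c ≠ '0' := fun hh => h n rest (by rw [hh])
    simp [emitPieces, hc]

-- leading-run decomposition helpers
theorem takeWhile_rep (c : Char) : ∀ (l : List Char),
    l.takeWhile (· == c) = List.replicate (l.takeWhile (· == c)).length c := by
  intro l
  induction l with
  | nil => rfl
  | cons d r ih =>
    by_cases hd : d = c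
    · subst hd
      simp only [List.takeWhile_cons, BEq.rfl, List.length_cons, List.replicate_succ]
      exact congrArg (d :: ·) ih
    · simp [List.takeWhile_cons, hd]

theorem head_dropWhile_ne (c : Char) : ∀ (l : List Char),
    (l.dropWhile (· == c)).head? ≠ some c := by
  intro l
  induction l with
  | nil => simp
  | cons d r ih =>
    by_cases hd : d = c
    · subst hd; simpa [List.dropWhile_cons] using ih
    · simp [List.dropWhile_cons, hd]

theorem master (m : Int) : ∀ (n : Nat) (l : List Char), l.length ≤ n → ∀ acc : List Char,
    bitUnstuffLoop m l 0 acc = acc ++ (emitPieces m (pyRuns l) false).flatten := by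
  intro n
  induction n with
  | zero =>
    intro l h acc
    have hnil : l = [] := List.eq_nil_of_length_eq_zero (Nat.le_zero.mp h)
    subst hnil
    simp [bitUnstuffLoop, pyRuns, emitPieces]
  | succ n ih =>
    intro l hl acc
    cases l with
    | nil => simp [bitUnstuffLoop, pyRuns, emitPieces]
    | cons c t =>
      have htw : (c :: t).takeWhile (· == c)
          = List.replicate ((t.takeWhile (· == c)).length + 1) c := by
        have h1 : (c :: t).takeWhile (· == c) = c :: t.takeWhile (· == c) := by
          simp [List.takeWhile_cons]
        rw [h1, List.replicate_succ]
        exact congrArg (c :: ·) (takeWhile_rep c t)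
      have hdecomp : c :: t
          = List.replicate ((t.takeWhile (· == c)).length + 1) c ++ (c :: t).dropWhile (· == c) := by
        conv_lhs => rw [← List.takeWhile_append_dropWhile (p := (· == c)) (l := c :: t)]
        rw [htw]
      have hhead : ((c :: t).dropWhile (· == c)).head? ≠ some c := head_dropWhile_ne c (c :: t)
      have hrest : (c :: t).dropWhile (· == c) = t.dropWhile (· == c) := by
        simp [List.dropWhile_cons]
      have hrlen : ((c :: t).dropWhile (· == c)).length ≤ n := by
        rw [hrest]
        have h2 := List.length_dropWhile_le (· == c) t
        simp only [List.length_cons] at hl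
        omega
      by_cases hc : c = '1'
      · subst hc
        rw [hdecomp, loop_run1 m _ _ 0 acc hhead]
        by_cases hcnd : (0 : Int) + (((t.takeWhile (· == '1')).length : Int) + 1) = m ∧
            (('1' :: t).dropWhile (· == '1')).head? = some '0'
        all_goals rw [runs_run '1' _ _ hhead]
        · -- the ones-run has length max_ones and a zero follows: A skips it, B shortens the zero run
          rw [if_pos hcnd]
          obtain ⟨hm, hz⟩ := hcnd
          obtain ⟨r, hr⟩ : ∃ r, ('1' :: t).dropWhile (· == '1') = '0' :: r := by
            cases hcase : ('1' :: t).dropWhile (· == '1') with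
            | nil => rw [hcase] at hz; simp at hz
            | cons d r =>
              rw [hcase] at hz
              simp only [List.head?_cons, Option.some.injEq] at hz
              exact ⟨r, by rw [hz]⟩
          have hrl : r.length ≤ n := by
            rw [hr] at hrlen; simp only [List.length_cons] at hrlen; omega
          rw [hr]
          simp only [List.tail_cons]
          rw [ih r hrl]
          obtain ⟨k0, hrdec⟩ : ∃ k0, r = List.replicate k0 '0' ++ r.dropWhile (· == '0') :=
            ⟨(r.takeWhile (· == '0')).length, by
              conv_lhs => rw [← List.takeWhile_append_dropWhile (p := (· == '0')) (l := r)]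
              rw [takeWhile_rep '0' r]
              simp⟩
          have hhead2 : (r.dropWhile (· == '0')).head? ≠ some '0' := head_dropWhile_ne '0' r
          have hruns_rest : pyRuns ('0' :: r)
              = ('0', k0 + 1) :: pyRuns (r.dropWhile (· == '0')) := by
            conv_lhs => rw [hrdec]
            rw [show ('0' : Char) :: (List.replicate k0 '0' ++ r.dropWhile (· == '0'))
                  = List.replicate (k0 + 1) '0' ++ r.dropWhile (· == '0') by
                rw [List.replicate_succ, List.cons_append]]
            exact runs_run '0' k0 _ hhead2
          have hbm : ((((t.takeWhile (· == '1')).length : Int) + 1) == m) = true :=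
            beq_iff_eq.mpr (by omega)
          rw [hruns_rest]
          cases k0 with
          | zero =>
            have hre : r = r.dropWhile (· == '0') := by
              conv_lhs => rw [hrdec]
              simp
            conv_lhs => rw [hre]
            simp [emitPieces, hbm, List.append_assoc]
            try omega
          | succ k' =>
            have hruns_r : pyRuns r = ('0', k' + 1) :: pyRuns (r.dropWhile (· == '0')) := by
              conv_lhs => rw [hrdec]
              exact runs_run '0' k' _ hhead2
            rw [hruns_r]
            simp [emitPieces, hbm, List.append_assoc]
            try omega
        · -- no skip: either the ones-run misses max_ones or no zero follows
          rw [if_neg hcnd, ih _ hrlen]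
          by_cases hm : (((t.takeWhile (· == '1')).length : Int) + 1) = m
          · have hz : (t.dropWhile (· == '1')).head? ≠ some '0' := by
              rw [← hrest]; intro hh; exact hcnd ⟨by omega, hh⟩
            have hbm : ((((t.takeWhile (· == '1')).length : Int) + 1) == m) = true :=
              beq_iff_eq.mpr hm
            have hirrel : emitPieces m (pyRuns (t.dropWhile (· == '1'))) true
                = emitPieces m (pyRuns (t.dropWhile (· == '1'))) false := by
              apply emit_pending_irrel
              intro n2 rs' heq
              cases hcase : t.dropWhile (· == '1') with
              | nil => rw [hcase] at heq; simp [pyRuns] at heq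
              | cons d r2 =>
                obtain ⟨k, rs, hk⟩ := runsAux_first d r2 1
                rw [hcase] at heq
                simp only [pyRuns] at heq
                rw [hk] at heq
                simp only [List.cons.injEq, Prod.mk.injEq] at heq
                have hd0 : d = '0' := heq.1.1
                rw [hcase] at hz
                simp [hd0] at hz
            simp [emitPieces, hbm, hirrel, List.append_assoc]
            try omega
          · have hbm : ((((t.takeWhile (· == '1')).length : Int) + 1) == m) = false :=
              beq_eq_false_iff_ne.mpr hm
            simp [emitPieces, hbm, List.append_assoc]
            try omega
      · rw [hdecomp, loop_run0 m c hc _ _ 0 acc, ih _ hrlen, runs_run c _ _ hhead]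
        have hb1 : (c == '1') = false := by simp [hc]
        simp [emitPieces, hb1]

-- ===== VERDICT (by name: the statement is the Claim_ definition above) =====
theorem bit_unstuff_spec : Claim_equal_bit_unstuff := by
  intro data max_ones _
  unfold Spec_bit_unstuff bit_unstuff bit_unstuff_alt
  rw [master max_ones data.toList.length data.toList le_rfl []]
  rfl
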